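-- pv_equiv track=rewrite | github.com/Etherum7/DSA | DP/numOfSubsetsWithProdcutLessThanK.py | numOfSubsets
-- ===== SOURCE A (Python) =====
-- def numOfSubsets(arr, N, K):
--     # code here
--     t=[[0]*(K+1) for j in range(N+1)]
--     for i in range(1, N+1):
--         for j in range(1, K+1):
--             if arr[i-1]>j:
--                 t[i][j]=t[i-1][j]
--             else:
--                 t[i][j]=1+ t[i-1][j//(arr[i-1])]+t[i-1][j]
--     return t[N][K]
-- ===== SOURCE B (Python) =====
-- def numOfSubsets(arr, N, K):
--     # Top-down memoized recursion on (items considered, budget): explores only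
--     # the states reachable from (N, K) instead of filling a dense (N+1)x(K+1) table.
--     memo = {}
--
--     def solve(i, j):
--         if i == 0 or j == 0:
--             return 0
--         if (i, j) not in memo:
--             a = arr[i - 1]
--             if a > j:
--                 memo[(i, j)] = solve(i - 1, j)
--             else:
--                 memo[(i, j)] = 1 + solve(i - 1, j // a) + solve(i - 1, j)
--         return memo[(i, j)]
--
--     return solve(N, K)
-- ===== Notes on version B (the rewrite author's own statement) =====
-- stated objective: alternative
-- what changed: B replaces the bottom-up dense (N+1)x(K+1) DP table with a top-down memoized recursion solve(i, j) that only visits the states reachable from (N, K) by the quotient chains; Pre_ restricts the claim to the recurrence's natural domain of positive elements (see cites).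
-- outside the precondition, e.g. on numOfSubsets([2, -3, 2], 2, 6): A returns 3, B returns 2
import Mathlib
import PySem

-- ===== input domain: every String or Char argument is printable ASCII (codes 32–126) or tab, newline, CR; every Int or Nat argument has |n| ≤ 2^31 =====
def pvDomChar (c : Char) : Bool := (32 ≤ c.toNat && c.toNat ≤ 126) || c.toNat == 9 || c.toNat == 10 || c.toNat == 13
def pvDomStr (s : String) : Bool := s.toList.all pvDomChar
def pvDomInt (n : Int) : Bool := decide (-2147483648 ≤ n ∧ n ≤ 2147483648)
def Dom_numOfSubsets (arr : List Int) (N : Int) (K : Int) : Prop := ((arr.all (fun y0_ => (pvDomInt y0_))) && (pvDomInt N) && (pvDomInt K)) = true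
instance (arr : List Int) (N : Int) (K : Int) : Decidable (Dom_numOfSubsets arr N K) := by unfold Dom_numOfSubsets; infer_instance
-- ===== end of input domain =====

-- ===== PORT A =====
-- B replaces A's dense bottom-up (N+1)x(K+1) table with a top-down recursion on (i, j)
-- (memoized in Python; the memo dict only caches solve's values, so the port computes the
-- same recursion without the cache — the returned value is identical).
-- A-side helpers for Python expressions A contains verbatim:
-- pvCell row j = row[j] (Python indexing, negative index wraps),
-- pvRow t i = t[i], pvV r a j = the cell formula 'r[j] if a>j else 1+r[j//a]+r[j]'.
def pvCell (row : List Int) (j : Int) : Int := (PySem.List.pyGet? row j).getD 0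
def pvRow (t : List (List Int)) (i : Int) : List Int := (PySem.List.pyGet? t i).getD []
def pvV (r : List Int) (a j : Int) : Int :=
  if a > j then pvCell r j
  else 1 + pvCell r (PySem.Int.floordiv j a) + pvCell r j

def numOfSubsets (arr : List Int) (N : Int) (K : Int) : Int :=
  let t0 : List (List Int) :=
    (PySem.List.pyRange 0 (N + 1) 1).map (fun _ => List.replicate (K + 1).toNat 0)
  let t :=
    (PySem.List.pyRange 1 (N + 1) 1).foldl (fun t i =>
      (PySem.List.pyRange 1 (K + 1) 1).foldl (fun t j =>
        PySem.List.pySetD t i (PySem.List.pySetD (pvRow t i) j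
          (pvV (pvRow t (i - 1)) ((PySem.List.pyGet? arr (i - 1)).getD 0) j))) t) t0
  pvCell (pvRow t N) K

-- ===== PORT B =====
-- Source B's solve(i, j): recursion on the item count i (structural on a Nat), j stays an Int;
-- arr[i-1] at i = iN+1 is the nonnegative index iN.
def pvSolveB (arr : List Int) : Nat → Int → Int
  | 0, _ => 0
  | iN + 1, j =>
    if j = 0 then 0
    else
      let a := (PySem.List.pyGet? arr (iN : Int)).getD 0
      if a > j then pvSolveB arr iN j
      else 1 + pvSolveB arr iN (PySem.Int.floordiv j a) + pvSolveB arr iN j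

def numOfSubsets_alt (arr : List Int) (N : Int) (K : Int) : Int :=
  pvSolveB arr N.toNat K

-- ===== PRECONDITION & SPEC =====
-- Pre_ is the recurrence's natural domain inside A's return domain: A raises IndexError when
-- N < 0 or K < 0, and, when K >= 1, IndexError for N > len(arr) and ZeroDivisionError on a zero
-- among arr[:N]; beyond that, Pre_ also excludes NEGATIVE elements among arr[:N] (on which A
-- still returns): the subset-product recurrence is only meaningful for positive values, and
-- there A's t[i-1][j//a] lookup silently wraps around through Python's negative-index rule,
-- an accident of the list representation that a recursive implementation has no row to wrap into.
def Pre_numOfSubsets (arr : List Int) (N : Int) (K : Int) : Prop :=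
  0 ≤ N ∧ 0 ≤ K ∧ (1 ≤ K → (N ≤ (arr.length : Int) ∧ ∀ x ∈ arr.take N.toNat, 0 < x))
instance (arr : List Int) (N : Int) (K : Int) : Decidable (Pre_numOfSubsets arr N K) := by
  unfold Pre_numOfSubsets; infer_instance
def pvWitness_numOfSubsets : List Int × Int × Int := ([2, 3, 1], 3, 5)

def Spec_numOfSubsets (arr : List Int) (N : Int) (K : Int) (out : Int) : Prop := out = numOfSubsets_alt arr N K
instance (arr : List Int) (N : Int) (K : Int) (out : Int) : Decidable (Spec_numOfSubsets arr N K out) := by unfold Spec_numOfSubsets; infer_instance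

-- ===== CLAIM (what is proved, stated in full; the proofs are below) =====
def Claim_equal_numOfSubsets : Prop := ∀ (arr : List Int) (N : Int) (K : Int), Dom_numOfSubsets arr N K → Pre_numOfSubsets arr N K → Spec_numOfSubsets arr N K (numOfSubsets arr N K)

-- ===== LEMMAS AND PROOFS =====
-- Proof-only helpers: pvInner = A's inner j-loop at row i; pvT0 = A's initial table;
-- pvBrow arr Kn m = the m-th table row written as a fold over the first m elements.
def pvInner (arr : List Int) (K : Int) (t : List (List Int)) (i : Int) : List (List Int) :=
  (PySem.List.pyRange 1 (K + 1) 1).foldl (fun t j =>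
    PySem.List.pySetD t i (PySem.List.pySetD (pvRow t i) j
      (pvV (pvRow t (i - 1)) ((PySem.List.pyGet? arr (i - 1)).getD 0) j))) t

def pvT0 (Nn Kn : Nat) : List (List Int) :=
  List.replicate (Nn + 1) (List.replicate (Kn + 1) 0)

def pvBrow (arr : List Int) (Kn : Nat) (m : Nat) : List Int :=
  (arr.take m).foldl
    (fun row a => 0 :: (PySem.List.pyRange 1 ((Kn : Int) + 1) 1).map (fun j => pvV row a j))
    (List.replicate (Kn + 1) 0)

lemma pv_portA (arr : List Int) (N K : Int) :
    numOfSubsets arr N K =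
      pvCell (pvRow ((PySem.List.pyRange 1 (N + 1) 1).foldl (pvInner arr K)
        ((PySem.List.pyRange 0 (N + 1) 1).map (fun _ => List.replicate (K + 1).toNat 0))) N) K := rfl

lemma pvRow_replicate (r : List Int) (n l : Nat) (h : l < n) :
    pvRow (List.replicate n r) (l : Int) = r := by
  simp [pvRow, h]

lemma pvRow_set_self (t : List (List Int)) (n : Nat) (r : List Int) (h : n < t.length) :
    pvRow (t.set n r) (n : Int) = r := by
  simp [pvRow, h]

lemma pvRow_set_ne (t : List (List Int)) (n l : Nat) (r : List Int) (h : n ≠ l) :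
    pvRow (t.set n r) (l : Int) = pvRow t (l : Int) := by
  simp [pvRow, PySem.List.pyGet?_natCast, List.getElem?_set_ne h]

-- A's inner loop only mutates row i; it collapses to t.set i (a fold over that row alone).
lemma pv_inner_collapse (a : Int) (m : Nat) :
    ∀ (js : List Int) (t : List (List Int)), m + 1 < t.length →
      js.foldl (fun t j =>
          PySem.List.pySetD t ((m : Int) + 1) (PySem.List.pySetD (pvRow t ((m : Int) + 1)) j
            (pvV (pvRow t ((m : Int) + 1 - 1)) a j))) t
        = t.set (m + 1) (js.foldl (fun row j => PySem.List.pySetD row j (pvV (pvRow t (m : Int)) a j))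
            (pvRow t ((m : Int) + 1))) := by
  intro js
  induction js with
  | nil =>
    intro t ht
    simp only [List.foldl_nil]
    rw [show ((m : Int) + 1) = ((m + 1 : Nat) : Int) by push_cast; ring]
    rw [pvRow, PySem.List.pyGet?_natCast, List.getElem?_eq_getElem ht, Option.getD_some,
      List.set_getElem_self]
  | cons j js ih =>
    intro t ht
    simp only [List.foldl_cons]
    have hmm : ((m : Int) + 1 - 1) = (m : Int) := by ring
    have hcast : ((m : Int) + 1) = ((m + 1 : Nat) : Int) := by push_cast; ring
    set v := pvV (pvRow t ((m : Int) + 1 - 1)) a j with hv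
    have hset : PySem.List.pySetD t ((m : Int) + 1) (PySem.List.pySetD (pvRow t ((m : Int) + 1)) j v)
        = t.set (m + 1) (PySem.List.pySetD (pvRow t ((m : Int) + 1)) j v) := by
      rw [hcast, PySem.List.pySetD_natCast]
    rw [hset]
    rw [ih _ (by simpa using ht)]
    have e1 : pvRow (t.set (m + 1) (PySem.List.pySetD (pvRow t ((m : Int) + 1)) j v)) (m : Int)
        = pvRow t (m : Int) := pvRow_set_ne _ _ _ _ (by omega)
    have e2 : pvRow (t.set (m + 1) (PySem.List.pySetD (pvRow t ((m : Int) + 1)) j v)) ((m : Int) + 1)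
        = PySem.List.pySetD (pvRow t ((m : Int) + 1)) j v := by
      rw [hcast]; exact pvRow_set_self _ _ _ ht
    rw [e1, e2, List.set_set]
    rw [show v = pvV (pvRow t (m : Int)) a j by rw [hv, hmm]]

-- Filling positions 1..k of a zero row in order yields the comprehension row.
lemma pv_rowfold (a : Int) (r : List Int) (Kn : Nat) :
    ∀ k : Nat, k ≤ Kn →
      (PySem.List.pyRange 1 ((k : Int) + 1) 1).foldl
          (fun row j => PySem.List.pySetD row j (pvV r a j)) (List.replicate (Kn + 1) 0)
        = 0 :: (((PySem.List.pyRange 1 ((k : Int) + 1) 1).map (fun j => pvV r a j))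
            ++ List.replicate (Kn - k) 0) := by
  intro k
  induction k with
  | zero =>
    intro _
    rw [PySem.List.pyRange_one_eq_nil (by omega)]
    simp [List.replicate_succ]
  | succ k ih =>
    intro hk
    have hsplit : PySem.List.pyRange 1 (((k + 1 : Nat) : Int) + 1) 1
        = PySem.List.pyRange 1 ((k : Int) + 1) 1 ++ [(k : Int) + 1] := by
      have := PySem.List.pyRange_one_succ_right (a := 1) (b := (k : Int) + 1) (by omega)
      rw [show (((k + 1 : Nat) : Int) + 1) = ((k : Int) + 1) + 1 by push_cast; ring, this]
    rw [hsplit, List.foldl_append, ih (by omega)]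
    simp only [List.foldl_cons, List.foldl_nil, List.map_append, List.map_cons, List.map_nil]
    have hlen : ((PySem.List.pyRange 1 ((k : Int) + 1) 1).map (fun j => pvV r a j)).length = k := by
      simp [PySem.List.length_pyRange_one]
    have hrep : List.replicate (Kn - k) (0 : Int) = 0 :: List.replicate (Kn - (k + 1)) 0 := by
      rw [← List.replicate_succ]; congr 1; omega
    have hidx : PySem.List.pySetD
        (0 :: ((PySem.List.pyRange 1 ((k : Int) + 1) 1).map (fun j => pvV r a j)
          ++ List.replicate (Kn - k) 0)) ((k : Int) + 1) (pvV r a ((k : Int) + 1))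
        = (0 :: ((PySem.List.pyRange 1 ((k : Int) + 1) 1).map (fun j => pvV r a j)
          ++ List.replicate (Kn - k) 0)).set (k + 1) (pvV r a ((k : Int) + 1)) := by
      rw [show ((k : Int) + 1) = ((k + 1 : Nat) : Int) by push_cast; ring,
        PySem.List.pySetD_natCast]
    rw [hidx, hrep, List.set_cons_succ]
    rw [List.set_append_right _ _ (by omega : ((PySem.List.pyRange 1 ((k : Int) + 1) 1).map (fun j => pvV r a j)).length ≤ k), hlen]
    simp [List.set_cons_zero]

lemma pv_outer (arr : List Int) (Kn Nn : Nat) (hlen : Nn ≤ arr.length) :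
    ∀ m : Nat, m ≤ Nn →
      ((PySem.List.pyRange 1 ((m : Int) + 1) 1).foldl (pvInner arr (Kn : Int)) (pvT0 Nn Kn)).length = Nn + 1
      ∧ pvRow ((PySem.List.pyRange 1 ((m : Int) + 1) 1).foldl (pvInner arr (Kn : Int)) (pvT0 Nn Kn)) (m : Int)
          = pvBrow arr Kn m
      ∧ ∀ l : Nat, m < l → l ≤ Nn →
          pvRow ((PySem.List.pyRange 1 ((m : Int) + 1) 1).foldl (pvInner arr (Kn : Int)) (pvT0 Nn Kn)) (l : Int)
            = List.replicate (Kn + 1) 0 := by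
  intro m
  induction m with
  | zero =>
    intro _
    rw [show ((0 : Nat) : Int) + 1 = 1 by norm_num, PySem.List.pyRange_one_eq_nil le_rfl]
    refine ⟨by simp [pvT0], ?_, ?_⟩
    · rw [List.foldl_nil, pvT0, pvRow_replicate _ _ _ (by omega)]
      simp [pvBrow]
    · intro l _ hl
      rw [List.foldl_nil, pvT0, pvRow_replicate _ _ _ (by omega)]
  | succ m ih =>
    intro hm
    obtain ⟨hL, hrow, hinv⟩ := ih (by omega)
    set t := (PySem.List.pyRange 1 ((m : Int) + 1) 1).foldl (pvInner arr (Kn : Int)) (pvT0 Nn Kn) with hT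
    have hsplit : PySem.List.pyRange 1 (((m + 1 : Nat) : Int) + 1) 1
        = PySem.List.pyRange 1 ((m : Int) + 1) 1 ++ [(m : Int) + 1] := by
      have := PySem.List.pyRange_one_succ_right (a := 1) (b := (m : Int) + 1) (by omega)
      rw [show (((m + 1 : Nat) : Int) + 1) = ((m : Int) + 1) + 1 by push_cast; ring, this]
    rw [hsplit, List.foldl_append, List.foldl_cons, List.foldl_nil, ← hT]
    have hmlt : m + 1 < t.length := by omega
    have hcoll := pv_inner_collapse ((PySem.List.pyGet? arr ((m : Int) + 1 - 1)).getD 0) m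
      (PySem.List.pyRange 1 ((Kn : Int) + 1) 1) t hmlt
    have hstep : pvInner arr (Kn : Int) t ((m : Int) + 1)
        = t.set (m + 1) ((PySem.List.pyRange 1 ((Kn : Int) + 1) 1).foldl
            (fun row j => PySem.List.pySetD row j
              (pvV (pvRow t (m : Int)) ((PySem.List.pyGet? arr ((m : Int) + 1 - 1)).getD 0) j))
            (pvRow t ((m : Int) + 1))) := hcoll
    have ha : (PySem.List.pyGet? arr ((m : Int) + 1 - 1)).getD 0 = arr[m]?.getD 0 := by
      rw [show ((m : Int) + 1 - 1) = ((m : Nat) : Int) by ring, PySem.List.pyGet?_natCast]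
    have hinit : pvRow t ((m : Int) + 1) = List.replicate (Kn + 1) 0 := by
      rw [show ((m : Int) + 1) = ((m + 1 : Nat) : Int) by push_cast; ring]
      exact hinv (m + 1) (by omega) (by omega)
    have hfold := pv_rowfold ((PySem.List.pyGet? arr ((m : Int) + 1 - 1)).getD 0)
      (pvRow t (m : Int)) Kn Kn le_rfl
    have hnewrow : pvInner arr (Kn : Int) t ((m : Int) + 1)
        = t.set (m + 1) (pvBrow arr Kn (m + 1)) := by
      rw [hstep, hinit, hfold]
      congr 1
      have htake : arr.take (m + 1) = arr.take m ++ [arr[m]?.getD 0] := by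
        rw [List.take_add_one, List.getElem?_eq_getElem (show m < arr.length by omega)]
        rfl
      rw [pvBrow, htake, List.foldl_append, List.foldl_cons, List.foldl_nil, ← pvBrow]
      rw [hrow, ha]
      simp
    rw [hnewrow]
    refine ⟨by simpa using hL, ?_, ?_⟩
    · exact pvRow_set_self _ _ _ (by omega)
    · intro l hl hlN
      rw [pvRow_set_ne _ _ _ _ (by omega)]
      exact hinv l (by omega) hlN

-- K = 0: A's inner loop is empty, so the table never changes; B's j = 0 base case answers 0.
lemma pv_inner_K0 (arr : List Int) (t : List (List Int)) (i : Int) :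
    pvInner arr 0 t i = t := by
  rw [pvInner, PySem.List.pyRange_one_eq_nil (by norm_num), List.foldl_nil]

lemma pv_outer_K0 (arr : List Int) (l : List Int) :
    ∀ t, l.foldl (pvInner arr 0) t = t := by
  induction l with
  | nil => intro t; rfl
  | cons x xs ih => intro t; rw [List.foldl_cons, pv_inner_K0]; exact ih t

lemma pvSolveB_j0 (arr : List Int) (m : Nat) : pvSolveB arr m 0 = 0 := by
  cases m <;> simp [pvSolveB]

-- Reading a cell of the comprehension row 0 :: [f j for j in range(1, K+1)].
lemma pvCell_cons_map (f : Int → Int) (Kn : Nat) (jn : Nat) (h1 : 1 ≤ jn) (h2 : jn ≤ Kn) :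
    pvCell (0 :: (PySem.List.pyRange 1 ((Kn : Int) + 1) 1).map f) (jn : Int) = f (jn : Int) := by
  obtain ⟨k, rfl⟩ : ∃ k, jn = k + 1 := ⟨jn - 1, by omega⟩
  rw [pvCell, PySem.List.pyGet?_natCast, PySem.List.pyRange_one]
  have hK : (((Kn : Int) + 1) - 1).toNat = Kn := by omega
  rw [hK]
  simp only [List.map_map, List.getElem?_cons_succ, List.getElem?_map, List.getElem?_range,
    show k < Kn by omega]
  simp only [Option.map_some, Option.getD_some, Function.comp_apply]
  congr 1
  push_cast
  ring

lemma pvCell_head (l : List Int) : pvCell (0 :: l) 0 = 0 := by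
  simp [pvCell, PySem.List.pyGet?, PySem.List.pyIdx?]

lemma pvCell_replicate (Kn : Nat) (jn : Nat) (h : jn ≤ Kn) :
    pvCell (List.replicate (Kn + 1) (0 : Int)) (jn : Int) = 0 := by
  rw [pvCell, PySem.List.pyGet?_natCast]
  simp [Nat.lt_succ_of_le h]

-- The heart of the equivalence: on positive elements the m-th table row holds exactly
-- the values of B's recursion (every budget stays in [0, Kn], so no index ever wraps).
lemma pv_brow_solveB (arr : List Int) (Kn : Nat) :
    ∀ m : Nat, m ≤ arr.length → (∀ x ∈ arr.take m, 0 < x) →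
      ∀ jn : Nat, jn ≤ Kn →
        pvCell (pvBrow arr Kn m) (jn : Int) = pvSolveB arr m (jn : Int) := by
  intro m
  induction m with
  | zero =>
    intro _ _ jn hj
    rw [show pvBrow arr Kn 0 = List.replicate (Kn + 1) 0 by simp [pvBrow]]
    rw [pvCell_replicate Kn jn hj]
    rfl
  | succ m ih =>
    intro hm hpos jn hj
    have hmlt : m < arr.length := by omega
    have htake : arr.take (m + 1) = arr.take m ++ [arr[m]] := by
      rw [List.take_add_one, List.getElem?_eq_getElem hmlt]
      rfl
    have hstep : pvBrow arr Kn (m + 1)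
        = 0 :: (PySem.List.pyRange 1 ((Kn : Int) + 1) 1).map (fun j => pvV (pvBrow arr Kn m) arr[m] j) := by
      rw [pvBrow, htake, List.foldl_append, List.foldl_cons, List.foldl_nil, ← pvBrow]
    have hpos' : ∀ x ∈ arr.take m, 0 < x := by
      intro x hx
      exact hpos x (by rw [htake]; exact List.mem_append_left _ hx)
    have hposm : 0 < arr[m] := by
      apply hpos
      rw [htake]
      exact List.mem_append_right _ (List.mem_singleton_self _)
    have ha : (PySem.List.pyGet? arr ((m : Nat) : Int)).getD 0 = arr[m] := by
      rw [PySem.List.pyGet?_natCast, List.getElem?_eq_getElem hmlt]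
      rfl
    by_cases hj0 : jn = 0
    · subst hj0
      rw [hstep, show ((0 : Nat) : Int) = 0 from rfl, pvCell_head, pvSolveB_j0]
    · have h1 : 1 ≤ jn := by omega
      rw [hstep, pvCell_cons_map _ Kn jn h1 hj]
      show pvV (pvBrow arr Kn m) arr[m] (jn : Int) = pvSolveB arr (m + 1) (jn : Int)
      have hjne : ((jn : Int) = 0) = False := by
        simp only [eq_iff_iff, iff_false]
        exact_mod_cast hj0
      rw [pvV, pvSolveB]
      simp only [hjne, if_false, ha]
      by_cases hcmp : arr[m] > (jn : Int)
      · rw [if_pos hcmp, if_pos hcmp, ih (by omega) hpos' jn hj]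
      · rw [if_neg hcmp, if_neg hcmp]
        have hfd : PySem.Int.floordiv (jn : Int) arr[m] = (jn : Int) / arr[m] :=
          PySem.Int.floordiv_eq_ediv_of_pos hposm
        have hq0 : 0 ≤ (jn : Int) / arr[m] := Int.ediv_nonneg (by positivity) (le_of_lt hposm)
        have hqle : (jn : Int) / arr[m] ≤ (jn : Int) := Int.ediv_le_self _ (by positivity)
        obtain ⟨q, hq⟩ : ∃ q : Nat, (jn : Int) / arr[m] = (q : Int) :=
          ⟨((jn : Int) / arr[m]).toNat, (Int.toNat_of_nonneg hq0).symm⟩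
        have hqK : q ≤ Kn := by omega
        rw [hfd, hq, ih (by omega) hpos' q hqK, ih (by omega) hpos' jn hj]

-- ===== VERDICT (by name: the statement is the Claim_ definition above) =====
theorem numOfSubsets_spec : Claim_equal_numOfSubsets := by
  intro arr N K _hdom hpre
  obtain ⟨hN0, hK0, himp⟩ := hpre
  obtain ⟨Nn, rfl⟩ : ∃ n : Nat, N = (n : Int) := ⟨N.toNat, (Int.toNat_of_nonneg hN0).symm⟩
  obtain ⟨Kn, rfl⟩ : ∃ n : Nat, K = (n : Int) := ⟨K.toNat, (Int.toNat_of_nonneg hK0).symm⟩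
  unfold Spec_numOfSubsets numOfSubsets_alt
  rw [pv_portA, Int.toNat_natCast]
  have hKrep : (((Kn : Int)) + 1).toNat = Kn + 1 := by omega
  by_cases hKn : 1 ≤ Kn
  · -- main case: K ≥ 1, hence N ≤ len(arr), all of arr[:N] positive, and the row simulation applies
    obtain ⟨hlen', hpos⟩ := himp (by exact_mod_cast hKn)
    have hlen : Nn ≤ arr.length := by exact_mod_cast hlen'
    have ht0 : ((PySem.List.pyRange 0 ((Nn : Int) + 1) 1).map
        (fun _ => List.replicate (((Kn : Int)) + 1).toNat 0)) = pvT0 Nn Kn := by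
      rw [hKrep, List.map_const', PySem.List.length_pyRange_one, pvT0]
      congr 1
    rw [ht0]
    obtain ⟨_, hrow, _⟩ := pv_outer arr Kn Nn hlen Nn le_rfl
    rw [hrow]
    have hpos' : ∀ x ∈ arr.take Nn, 0 < x := by
      intro x hx
      exact hpos x (by simpa using hx)
    exact pv_brow_solveB arr Kn Nn hlen hpos' Kn le_rfl
  · -- K = 0: the table is never written, and B answers 0 from its j = 0 base case
    have hK : Kn = 0 := by omega
    subst hK
    simp only [Nat.cast_zero]
    rw [pv_outer_K0, pvSolveB_j0]
    have hmap : ((PySem.List.pyRange 0 ((Nn : Int) + 1) 1).map (fun _ => List.replicate ((0 : Int) + 1).toNat 0))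
        = List.replicate (Nn + 1) [(0 : Int)] := by
      rw [List.map_const', PySem.List.length_pyRange_one]
      norm_num
    rw [hmap, pvRow_replicate _ _ _ (by omega)]
    rfl
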